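-- pv_equiv track=rewrite | github.com/posl/comment_recommendation | script/split_gen/3_time/zh/162_D/6.py | find_3tuples
-- ===== SOURCE A (Python) =====
-- def find_3tuples(string):
--     N = len(string)
--     count = 0
--     for i in range(N-2):
--         for j in range(i+1, N-1):
--             for k in range(j+1, N):
--                 if string[i] != string[j] and string[i] != string[k] and string[j] != string[k]:
--                     if (j-i) != (k-j):
--                         count += 1
--     return count
-- ===== SOURCE B (Python) =====
-- def find_3tuples(string):
--     # O(N^2): for each pair i<j with distinct chars, count valid k>j in O(1)
--     # using a running counter of suffix character frequencies.
--     N = len(string)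
--     total = 0
--     counter = {}
--     for j in range(N - 2, 0, -1):
--         c1 = string[j + 1]
--         counter[c1] = counter.get(c1, 0) + 1
--         sj = string[j]
--         rem = N - 1 - j
--         for i in range(j):
--             si = string[i]
--             if si != sj:
--                 k = 2 * j - i
--                 extra = 1 if k < N and string[k] != si and string[k] != sj else 0
--                 total += rem - counter.get(si, 0) - counter.get(sj, 0) - extra
--     return total
-- ===== Notes on version B (the rewrite author's own statement) =====
-- stated objective: faster
-- what changed: B replaces A's brute-force O(N^3) triple loop by an O(N^2) double loop: iterating j downward it maintains a counter of suffix character frequencies, so for each pair i<j the number of valid k>j is computed in O(1) arithmetic (suffix length minus two counts minus one equally-spaced check) instead of an inner scan.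
import Mathlib
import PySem

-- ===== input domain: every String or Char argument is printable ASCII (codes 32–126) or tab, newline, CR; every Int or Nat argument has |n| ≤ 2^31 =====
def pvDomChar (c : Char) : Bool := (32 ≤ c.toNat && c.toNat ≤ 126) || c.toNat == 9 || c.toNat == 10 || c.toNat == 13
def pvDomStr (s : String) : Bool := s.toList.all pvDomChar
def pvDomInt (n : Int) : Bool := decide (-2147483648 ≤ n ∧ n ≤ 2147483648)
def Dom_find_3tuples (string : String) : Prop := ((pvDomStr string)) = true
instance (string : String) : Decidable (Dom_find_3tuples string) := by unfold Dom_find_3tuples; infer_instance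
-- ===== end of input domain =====

-- B replaces A's O(N^3) triple loop by an O(N^2) double loop: for each pair i<j it
-- counts the valid k>j in O(1) from a running suffix character counter.

-- ===== PORT A =====
-- literal transliteration of A's triple loop
def find_3tuples (string : String) : Int :=
  let cs := string.toList
  let N : Int := cs.length
  (PySem.List.pyRange 0 (N - 2)).foldl (fun count i =>
    (PySem.List.pyRange (i + 1) (N - 1)).foldl (fun count j =>
      (PySem.List.pyRange (j + 1) N).foldl (fun count k =>
        if PySem.List.pyGetD cs i ' ' ≠ PySem.List.pyGetD cs j ' ' ∧
           PySem.List.pyGetD cs i ' ' ≠ PySem.List.pyGetD cs k ' ' ∧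
           PySem.List.pyGetD cs j ' ' ≠ PySem.List.pyGetD cs k ' ' then
          if j - i ≠ k - j then count + 1 else count
        else count) count) count) 0

-- ===== PORT B =====
-- B's outer-loop body (the Python `for j in range(N-2, 0, -1)` body, carrying (total, counter))
def pvAltStep (cs : List Char) (acc : Int × PySem.Dict Char Int) (j : Int) :
    Int × PySem.Dict Char Int :=
  let N : Int := cs.length
  let c1 := PySem.List.pyGetD cs (j + 1) ' '
  let counter := acc.2.insert c1 (acc.2.getD c1 0 + 1)
  let sj := PySem.List.pyGetD cs j ' '
  let rem := N - 1 - j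
  let total := (PySem.List.pyRange 0 j).foldl (fun t i =>
    let si := PySem.List.pyGetD cs i ' '
    if si ≠ sj then
      let k := 2 * j - i
      let extra : Int :=
        if k < N ∧ PySem.List.pyGetD cs k ' ' ≠ si ∧ PySem.List.pyGetD cs k ' ' ≠ sj then 1 else 0
      t + (rem - counter.getD si 0 - counter.getD sj 0 - extra)
    else t) acc.1
  (total, counter)

def find_3tuples_alt (string : String) : Int :=
  let cs := string.toList
  let N : Int := cs.length
  ((PySem.List.pyRange (N - 2) 0 (-1)).foldl (pvAltStep cs)
    ((0 : Int), (PySem.Dict.empty : PySem.Dict Char Int))).1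

-- ===== PRECONDITION & SPEC =====
def Spec_find_3tuples (string : String) (out : Int) : Prop := out = find_3tuples_alt string
instance (string : String) (out : Int) : Decidable (Spec_find_3tuples string out) := by unfold Spec_find_3tuples; infer_instance

-- ===== CLAIM (what is proved, stated in full; the proofs are below) =====
def Claim_equal_find_3tuples : Prop := ∀ (string : String), Dom_find_3tuples string → Spec_find_3tuples string (find_3tuples string)

-- ===== LEMMAS AND PROOFS =====

-- the per-pair (i, j) contribution both programs compute (B's addend, written with suffix counts)
def pvG (cs : List Char) (i j : Int) : Int :=
  let N : Int := cs.length
  let si := PySem.List.pyGetD cs i ' '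
  let sj := PySem.List.pyGetD cs j ' '
  if si ≠ sj then
    (N - 1 - j) - ((cs.drop (j + 1).toNat).count si : Int) - ((cs.drop (j + 1).toNat).count sj : Int)
      - (if 2 * j - i < N ∧ PySem.List.pyGetD cs (2 * j - i) ' ' ≠ si ∧
            PySem.List.pyGetD cs (2 * j - i) ' ' ≠ sj then 1 else 0)
  else 0

-- the common reference value: sum of pvG over 1 ≤ j < N-1, 0 ≤ i < j
def pvS (cs : List Char) : Int :=
  ((PySem.List.pyRange 1 ((cs.length : Int) - 1)).map (fun j =>
    ((PySem.List.pyRange 0 j).map (fun i => pvG cs i j)).sum)).sum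

-- a foldl whose step adds a value independent of the accumulator is a sum
theorem pv_foldl_shift {α : Type} (f : Int → α → Int) (δ : α → Int)
    (h : ∀ c x, f c x = c + δ x) (l : List α) (c : Int) :
    l.foldl f c = c + (l.map δ).sum := by
  have : f = fun c x => c + δ x := funext fun c => funext fun x => h c x
  rw [this, PySem.List.foldl_add]

-- counting elements different from two distinct chars
theorem pv_sum_indicator_two (a b : Char) (hab : a ≠ b) (l : List Char) :
    ((l.map (fun c => if a ≠ c ∧ b ≠ c then (1 : Int) else 0)).sum)
      = (l.length : Int) - l.count a - l.count b := by
  induction l with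
  | nil => simp
  | cons x xs ih =>
    by_cases hxa : a = x
    · subst hxa
      simp only [List.map_cons, List.sum_cons, List.count_cons, List.length_cons]
      have : ¬ (a ≠ a ∧ b ≠ a) := by tauto
      rw [if_neg this]
      have hba : (a == b) = false := by simp [hab]
      simp only [beq_self_eq_true, if_pos, hba, Bool.false_eq_true, if_false]
      push_cast
      omega
    · by_cases hxb : b = x
      · subst hxb
        simp only [List.map_cons, List.sum_cons, List.count_cons, List.length_cons]
        have : ¬ (a ≠ b ∧ b ≠ b) := by tauto
        rw [if_neg this]
        have hab' : (b == a) = false := by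
          simp [show b ≠ a from fun h => hab h.symm]
        simp only [beq_self_eq_true, if_pos, hab', Bool.false_eq_true, if_false]
        push_cast
        omega
      · simp only [List.map_cons, List.sum_cons, List.count_cons, List.length_cons]
        have : (a ≠ x ∧ b ≠ x) := ⟨fun h => hxa h, fun h => hxb h⟩
        rw [if_pos this]
        have h1 : (x == a) = false := by simp [show x ≠ a from fun h => hxa h.symm]
        have h2 : (x == b) = false := by simp [show x ≠ b from fun h => hxb h.symm]
        simp only [h1, h2, Bool.false_eq_true, if_false]
        push_cast
        omega

-- removing one forbidden index from an indicator sum over a nodup list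
theorem pv_sum_indicator_erase (p : Int → Prop) [DecidablePred p] (m : Int) (l : List Int)
    (h : l.Nodup) :
    (l.map (fun k => if p k ∧ k ≠ m then (1 : Int) else 0)).sum
      = (l.map (fun k => if p k then (1 : Int) else 0)).sum
        - (if m ∈ l ∧ p m then 1 else 0) := by
  induction l with
  | nil => simp
  | cons x xs ih =>
    have hx : x ∉ xs := (List.nodup_cons.mp h).1
    have ihs := ih (List.nodup_cons.mp h).2
    simp only [List.map_cons, List.sum_cons, ihs, List.mem_cons]
    by_cases hxm : x = m
    · have hml : ¬ (m ∈ xs) := fun hm => hx (hxm ▸ hm)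
      rw [if_neg (show ¬ (p x ∧ x ≠ m) by tauto)]
      rw [if_neg (show ¬ (m ∈ xs ∧ p m) by tauto)]
      rw [hxm]
      rw [if_congr (show ((m = m ∨ m ∈ xs) ∧ p m) ↔ p m by simp) rfl rfl]
      split_ifs <;> ring
    · rw [if_congr (show (p x ∧ x ≠ m) ↔ p x by tauto) rfl rfl]
      rw [if_congr (show ((m = x ∨ m ∈ xs) ∧ p m) ↔ (m ∈ xs ∧ p m) by
        constructor
        · rintro ⟨hm | hm, hp⟩
          · exact absurd hm.symm hxm
          · exact ⟨hm, hp⟩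
        · exact fun hh => ⟨Or.inr hh.1, hh.2⟩) rfl rfl]
      ring

-- A's innermost loop sum equals pvG, for in-range i < j
theorem pv_innerA (cs : List Char) (i j : Int) (h0 : 0 ≤ i) (hij : i < j)
    (hj : j < (cs.length : Int) - 1) :
    ((PySem.List.pyRange (j + 1) (cs.length : Int)).map (fun k =>
      if PySem.List.pyGetD cs i ' ' ≠ PySem.List.pyGetD cs j ' ' ∧
         PySem.List.pyGetD cs i ' ' ≠ PySem.List.pyGetD cs k ' ' ∧
         PySem.List.pyGetD cs j ' ' ≠ PySem.List.pyGetD cs k ' ' then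
        (if j - i ≠ k - j then (1 : Int) else 0) else 0)).sum = pvG cs i j := by
  set si := PySem.List.pyGetD cs i ' ' with hsi
  set sj := PySem.List.pyGetD cs j ' ' with hsj
  by_cases hss : si ≠ sj
  · have hrw : ∀ k : Int,
        (if si ≠ sj ∧ si ≠ PySem.List.pyGetD cs k ' ' ∧ sj ≠ PySem.List.pyGetD cs k ' ' then
          (if j - i ≠ k - j then (1 : Int) else 0) else 0)
        = (if (si ≠ PySem.List.pyGetD cs k ' ' ∧ sj ≠ PySem.List.pyGetD cs k ' ') ∧
              k ≠ 2 * j - i then (1 : Int) else 0) := by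
      intro k
      by_cases hp : si ≠ PySem.List.pyGetD cs k ' ' ∧ sj ≠ PySem.List.pyGetD cs k ' '
      · by_cases hk : k = 2 * j - i
        · rw [if_pos ⟨hss, hp.1, hp.2⟩, if_neg (show ¬ (j - i ≠ k - j) by omega),
              if_neg (by tauto)]
        · rw [if_pos ⟨hss, hp.1, hp.2⟩, if_pos (show j - i ≠ k - j by omega),
              if_pos ⟨hp, hk⟩]
      · rw [if_neg (by tauto), if_neg (by tauto)]
    rw [List.map_congr_left (fun k _ => hrw k)]
    rw [pv_sum_indicator_erase
      (fun k => si ≠ PySem.List.pyGetD cs k ' ' ∧ sj ≠ PySem.List.pyGetD cs k ' ')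
      (2 * j - i) _ (PySem.List.nodup_pyRange_one _ _)]
    have hcomp : (fun k => if si ≠ PySem.List.pyGetD cs k ' ' ∧ sj ≠ PySem.List.pyGetD cs k ' '
          then (1 : Int) else 0)
        = (fun c => if si ≠ c ∧ sj ≠ c then (1 : Int) else 0) ∘
            (fun k => PySem.List.pyGetD cs k ' ') := rfl
    rw [hcomp, ← List.map_map, PySem.List.map_pyGetD_pyRange' cs ' ' (show (0:Int) ≤ j + 1 by omega),
        pv_sum_indicator_two si sj hss]
    have hmem : (2 * j - i ∈ PySem.List.pyRange (j + 1) (cs.length : Int)) ↔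
        (j + 1 ≤ 2 * j - i ∧ 2 * j - i < (cs.length : Int)) := PySem.List.mem_pyRange_one
    have hcond : ((2 * j - i ∈ PySem.List.pyRange (j + 1) (cs.length : Int)) ∧
          (si ≠ PySem.List.pyGetD cs (2 * j - i) ' ' ∧ sj ≠ PySem.List.pyGetD cs (2 * j - i) ' '))
        ↔ (2 * j - i < (cs.length : Int) ∧ PySem.List.pyGetD cs (2 * j - i) ' ' ≠ si ∧
            PySem.List.pyGetD cs (2 * j - i) ' ' ≠ sj) := by
      rw [hmem]
      constructor
      · rintro ⟨⟨_, h2⟩, h3, h4⟩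
        exact ⟨h2, h3.symm, h4.symm⟩
      · rintro ⟨h2, h3, h4⟩
        exact ⟨⟨by omega, h2⟩, h3.symm, h4.symm⟩
    rw [if_congr hcond rfl rfl]
    have hlen : ((cs.drop (j + 1).toNat).length : Int) = (cs.length : Int) - 1 - j := by
      rw [List.length_drop]
      omega
    rw [hlen]
    simp only [pvG, ← hsi, ← hsj]
    rw [if_pos hss]
  · have hz : ∀ k : Int,
        (if si ≠ sj ∧ si ≠ PySem.List.pyGetD cs k ' ' ∧ sj ≠ PySem.List.pyGetD cs k ' ' then
          (if j - i ≠ k - j then (1 : Int) else 0) else 0) = 0 := by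
      intro k
      rw [if_neg (by tauto)]
    rw [List.map_congr_left (fun k _ => hz k)]
    simp only [pvG, ← hsi, ← hsj]
    rw [if_neg hss]
    simp

-- triangular sum exchange over integer ranges
theorem pv_exchange (f : Int → Int → Int) (M : Int) :
    ((PySem.List.pyRange 0 (M - 1)).map (fun i =>
      ((PySem.List.pyRange (i + 1) M).map (fun j => f i j)).sum)).sum
    = ((PySem.List.pyRange 1 M).map (fun j =>
      ((PySem.List.pyRange 0 j).map (fun i => f i j)).sum)).sum := by
  have main : ∀ (n : Nat) (M : Int), M.toNat = n →
      ((PySem.List.pyRange 0 (M - 1)).map (fun i =>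
        ((PySem.List.pyRange (i + 1) M).map (fun j => f i j)).sum)).sum
      = ((PySem.List.pyRange 1 M).map (fun j =>
        ((PySem.List.pyRange 0 j).map (fun i => f i j)).sum)).sum := by
    intro n
    induction n with
    | zero =>
      intro M hM
      rw [PySem.List.pyRange_one_eq_nil (show M - 1 ≤ 0 by omega),
          PySem.List.pyRange_one_eq_nil (show M ≤ 1 by omega)]
      simp
    | succ n ih =>
      intro M hM
      by_cases hM2 : 2 ≤ M
      · have e1 : List.map (fun i => ((PySem.List.pyRange (i + 1) M).map (fun j => f i j)).sum)
            (PySem.List.pyRange 0 (M - 1))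
            = List.map (fun i => ((PySem.List.pyRange (i + 1) (M - 1)).map (fun j => f i j)).sum
                + f i (M - 1)) (PySem.List.pyRange 0 (M - 1)) := by
          apply List.map_congr_left
          intro a ha
          have hab := PySem.List.mem_pyRange_one.mp ha
          have h := PySem.List.pyRange_one_succ_right (show a + 1 ≤ M - 1 by omega)
          rw [show M - 1 + 1 = M by ring] at h
          rw [h, List.map_append, List.sum_append, List.map_cons, List.map_nil,
              List.sum_cons, List.sum_nil, add_zero]
        have e2 : PySem.List.pyRange 0 (M - 1) = PySem.List.pyRange 0 (M - 2) ++ [M - 2] := by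
          have h := PySem.List.pyRange_one_succ_right (show (0 : Int) ≤ M - 2 by omega)
          rw [show M - 2 + 1 = M - 1 by ring] at h
          exact h
        have e3 : PySem.List.pyRange 1 M = PySem.List.pyRange 1 (M - 1) ++ [M - 1] := by
          have h := PySem.List.pyRange_one_succ_right (show (1 : Int) ≤ M - 1 by omega)
          rw [show M - 1 + 1 = M by ring] at h
          exact h
        have ihm := ih (M - 1) (by omega)
        rw [show M - 1 - 1 = M - 2 by ring] at ihm
        rw [e1, PySem.List.sum_map_add_int, e2, e3]
        simp only [List.map_append, List.sum_append, List.map_cons, List.map_nil,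
          List.sum_cons, List.sum_nil]
        rw [show M - 2 + 1 = M - 1 by ring,
            PySem.List.pyRange_one_eq_nil (le_refl (M - 1))]
        rw [ihm, e2]
        simp only [List.map_append, List.sum_append, List.map_cons, List.map_nil,
          List.sum_cons, List.sum_nil]
        ring
      · have hM1 : M = 1 := by omega
        subst hM1
        rw [show (1 : Int) - 1 = 0 by ring,
            PySem.List.pyRange_one_eq_nil (le_refl (0 : Int)),
            PySem.List.pyRange_one_eq_nil (le_refl (1 : Int))]
        simp
  exact main M.toNat M rfl

-- B's descending outer loop computes the suffix sums of pvS, given the counter invariant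
theorem pv_Bloop (cs : List Char) (n : Nat) : ∀ (j : Int), j.toNat = n →
    j ≤ (cs.length : Int) - 2 →
    ∀ (t0 : Int) (d : PySem.Dict Char Int),
      (∀ c, d.getD c 0 = ((cs.drop (j + 2).toNat).count c : Int)) →
      ((PySem.List.pyRange j 0 (-1)).foldl (pvAltStep cs) (t0, d)).1
        = t0 + ((PySem.List.pyRange 1 (j + 1)).map (fun j' =>
            ((PySem.List.pyRange 0 j').map (fun i => pvG cs i j')).sum)).sum := by
  induction n with
  | zero =>
    intro j hj _ t0 d _
    rw [PySem.List.pyRange_neg_one_eq_nil (show j ≤ 0 by omega),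
        PySem.List.pyRange_one_eq_nil (show j + 1 ≤ 1 by omega)]
    simp
  | succ n ih =>
    intro j hj hjle t0 d hd
    have hj1 : 1 ≤ j := by omega
    have hjN : j + 1 < (cs.length : Int) := by omega
    have hjNat : (j + 1).toNat < cs.length := by omega
    rw [PySem.List.pyRange_neg_one_cons (show (0 : Int) < j by omega), List.foldl_cons]
    have hdrop' : cs.drop (j + 1).toNat
        = PySem.List.pyGetD cs (j + 1) ' ' :: cs.drop ((j + 1).toNat + 1) := by
      rw [PySem.List.pyGetD_eq_getElem cs ' ' (by omega) hjN]
      exact List.drop_eq_getElem_cons hjNat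
    have hd' : ∀ c, ((d.insert (PySem.List.pyGetD cs (j + 1) ' ')
          (d.getD (PySem.List.pyGetD cs (j + 1) ' ') 0 + 1)).getD c 0)
        = ((cs.drop (j + 1).toNat).count c : Int) := by
      intro c
      rw [PySem.Dict.getD_insert]
      by_cases hcc : c = PySem.List.pyGetD cs (j + 1) ' '
      · rw [if_pos hcc, hcc, hd, hdrop', List.count_cons,
            show ((j + 1).toNat + 1) = (j + 2).toNat by omega]
        simp
      · rw [if_neg hcc, hd, hdrop', List.count_cons,
            show ((j + 1).toNat + 1) = (j + 2).toNat by omega]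
        have hne : PySem.List.pyGetD cs (j + 1) ' ' ≠ c := fun h => hcc (Eq.symm h)
        have : (PySem.List.pyGetD cs (j + 1) ' ' == c) = false := by
          simp [hne]
        rw [this]
        simp
    have hstep : pvAltStep cs (t0, d) j
        = (t0 + ((PySem.List.pyRange 0 j).map (fun i => pvG cs i j)).sum,
           d.insert (PySem.List.pyGetD cs (j + 1) ' ')
             (d.getD (PySem.List.pyGetD cs (j + 1) ' ') 0 + 1)) := by
      simp only [pvAltStep]
      refine Prod.ext ?_ rfl
      apply pv_foldl_shift
      intro t i
      simp only [pvG]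
      by_cases hss : PySem.List.pyGetD cs i ' ' ≠ PySem.List.pyGetD cs j ' '
      · rw [if_pos hss, if_pos hss, hd' (PySem.List.pyGetD cs i ' '),
            hd' (PySem.List.pyGetD cs j ' ')]
      · rw [if_neg hss, if_neg hss, add_zero]
    rw [hstep]
    have hd2 : ∀ c, ((d.insert (PySem.List.pyGetD cs (j + 1) ' ')
          (d.getD (PySem.List.pyGetD cs (j + 1) ' ') 0 + 1)).getD c 0)
        = ((cs.drop ((j - 1) + 2).toNat).count c : Int) := by
      intro c
      rw [show (j - 1) + 2 = j + 1 by ring]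
      exact hd' c
    rw [ih (j - 1) (by omega) (by omega) _ _ hd2]
    have hsplit : PySem.List.pyRange 1 (j + 1) = PySem.List.pyRange 1 j ++ [j] :=
      PySem.List.pyRange_one_succ_right hj1
    rw [show (j - 1) + 1 = j by ring, hsplit]
    simp only [List.map_append, List.sum_append, List.map_cons, List.map_nil,
      List.sum_cons, List.sum_nil]
    ring

theorem pv_A_eq_S (cs : List Char) :
    (PySem.List.pyRange 0 ((cs.length : Int) - 2)).foldl (fun count i =>
      (PySem.List.pyRange (i + 1) ((cs.length : Int) - 1)).foldl (fun count j =>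
        (PySem.List.pyRange (j + 1) (cs.length : Int)).foldl (fun count k =>
          if PySem.List.pyGetD cs i ' ' ≠ PySem.List.pyGetD cs j ' ' ∧
             PySem.List.pyGetD cs i ' ' ≠ PySem.List.pyGetD cs k ' ' ∧
             PySem.List.pyGetD cs j ' ' ≠ PySem.List.pyGetD cs k ' ' then
            if j - i ≠ k - j then count + 1 else count
          else count) count) count) 0 = pvS cs := by
  have hinner : ∀ (i j c : Int),
      (PySem.List.pyRange (j + 1) (cs.length : Int)).foldl (fun count k =>
        if PySem.List.pyGetD cs i ' ' ≠ PySem.List.pyGetD cs j ' ' ∧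
           PySem.List.pyGetD cs i ' ' ≠ PySem.List.pyGetD cs k ' ' ∧
           PySem.List.pyGetD cs j ' ' ≠ PySem.List.pyGetD cs k ' ' then
          if j - i ≠ k - j then count + 1 else count
        else count) c
      = c + ((PySem.List.pyRange (j + 1) (cs.length : Int)).map (fun k =>
          if PySem.List.pyGetD cs i ' ' ≠ PySem.List.pyGetD cs j ' ' ∧
             PySem.List.pyGetD cs i ' ' ≠ PySem.List.pyGetD cs k ' ' ∧
             PySem.List.pyGetD cs j ' ' ≠ PySem.List.pyGetD cs k ' ' then
            (if j - i ≠ k - j then (1 : Int) else 0) else 0)).sum := by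
    intro i j c
    apply pv_foldl_shift
    intro c' k
    split_ifs <;> ring
  have hmid : ∀ (i c : Int),
      (PySem.List.pyRange (i + 1) ((cs.length : Int) - 1)).foldl (fun count j =>
        (PySem.List.pyRange (j + 1) (cs.length : Int)).foldl (fun count k =>
          if PySem.List.pyGetD cs i ' ' ≠ PySem.List.pyGetD cs j ' ' ∧
             PySem.List.pyGetD cs i ' ' ≠ PySem.List.pyGetD cs k ' ' ∧
             PySem.List.pyGetD cs j ' ' ≠ PySem.List.pyGetD cs k ' ' then
            if j - i ≠ k - j then count + 1 else count
          else count) count) c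
      = c + ((PySem.List.pyRange (i + 1) ((cs.length : Int) - 1)).map (fun j =>
          ((PySem.List.pyRange (j + 1) (cs.length : Int)).map (fun k =>
            if PySem.List.pyGetD cs i ' ' ≠ PySem.List.pyGetD cs j ' ' ∧
               PySem.List.pyGetD cs i ' ' ≠ PySem.List.pyGetD cs k ' ' ∧
               PySem.List.pyGetD cs j ' ' ≠ PySem.List.pyGetD cs k ' ' then
              (if j - i ≠ k - j then (1 : Int) else 0) else 0)).sum)).sum := by
    intro i c
    apply pv_foldl_shift
    intro c' j
    exact hinner i j c'
  rw [pv_foldl_shift _ _ (fun c i => hmid i c)]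
  have hG : List.map (fun i =>
        ((PySem.List.pyRange (i + 1) ((cs.length : Int) - 1)).map (fun j =>
          ((PySem.List.pyRange (j + 1) (cs.length : Int)).map (fun k =>
            if PySem.List.pyGetD cs i ' ' ≠ PySem.List.pyGetD cs j ' ' ∧
               PySem.List.pyGetD cs i ' ' ≠ PySem.List.pyGetD cs k ' ' ∧
               PySem.List.pyGetD cs j ' ' ≠ PySem.List.pyGetD cs k ' ' then
              (if j - i ≠ k - j then (1 : Int) else 0) else 0)).sum)).sum)
        (PySem.List.pyRange 0 ((cs.length : Int) - 2))
      = List.map (fun i =>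
          ((PySem.List.pyRange (i + 1) ((cs.length : Int) - 1)).map (fun j => pvG cs i j)).sum)
        (PySem.List.pyRange 0 ((cs.length : Int) - 2)) := by
    apply List.map_congr_left
    intro i hi
    have hib := PySem.List.mem_pyRange_one.mp hi
    congr 1
    apply List.map_congr_left
    intro j hj
    have hjb := PySem.List.mem_pyRange_one.mp hj
    exact pv_innerA cs i j (by omega) (by omega) (by omega)
  rw [hG]
  have hex := pv_exchange (fun i j => pvG cs i j) ((cs.length : Int) - 1)
  rw [show (cs.length : Int) - 1 - 1 = (cs.length : Int) - 2 by ring] at hex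
  rw [zero_add, hex]
  rfl

theorem pv_B_eq_S (cs : List Char) :
    ((PySem.List.pyRange ((cs.length : Int) - 2) 0 (-1)).foldl (pvAltStep cs)
      ((0 : Int), (PySem.Dict.empty : PySem.Dict Char Int))).1 = pvS cs := by
  have hinv : ∀ c, (PySem.Dict.empty : PySem.Dict Char Int).getD c 0
      = ((cs.drop (((cs.length : Int) - 2) + 2).toNat).count c : Int) := by
    intro c
    rw [show (((cs.length : Int) - 2) + 2).toNat = cs.length by omega, List.drop_length]
    simp [pysem]
  rw [pv_Bloop cs ((cs.length : Int) - 2).toNat ((cs.length : Int) - 2) rfl (le_refl _)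
      0 PySem.Dict.empty hinv]
  rw [show ((cs.length : Int) - 2) + 1 = (cs.length : Int) - 1 by ring, zero_add]
  rfl

-- ===== VERDICT (by name: the statement is the Claim_ definition above) =====
theorem find_3tuples_spec : Claim_equal_find_3tuples := by
  intro string _
  unfold Spec_find_3tuples find_3tuples find_3tuples_alt
  rw [pv_A_eq_S string.toList, pv_B_eq_S string.toList]
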